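-- pv_equiv track=rewrite | github.com/daaibraanies/go_game_ai | GO game/new_sly_player.py | left_bound_area
-- ===== SOURCE A (Python) =====
-- def left_bound_area(path):
--     area = set()
--     for vertex in path:
--         vrow, vcol = vertex
--         left_col = vcol - 1
--         while left_col >= 0:
--             if (vrow, left_col) not in path:
--                 area.add((vrow, left_col))
--             left_col -= 1
--     return area
-- ===== SOURCE B (Python) =====
-- def left_bound_area(path):
--     # One pass: per-row max-column coverage so each column is visited at most once.
--     path_set = set(path)
--     cov = {}
--     area = set()
--     for r, c in path:
--         lo = cov.get(r, 0)
--         for col in range(c - 1, lo - 1, -1):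
--             if (r, col) not in path_set:
--                 area.add((r, col))
--         if c > lo:
--             cov[r] = c
--     return area
-- ===== Notes on version B (the rewrite author's own statement) =====
-- stated objective: faster
-- what changed: Replaces A's per-vertex full leftward rescan with list membership (O(n * maxcol * n)) by a single pass that keeps a per-row maximum-covered-column dict and a hash set of path cells, so each (row,col) cell is examined at most once.
import Mathlib
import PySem

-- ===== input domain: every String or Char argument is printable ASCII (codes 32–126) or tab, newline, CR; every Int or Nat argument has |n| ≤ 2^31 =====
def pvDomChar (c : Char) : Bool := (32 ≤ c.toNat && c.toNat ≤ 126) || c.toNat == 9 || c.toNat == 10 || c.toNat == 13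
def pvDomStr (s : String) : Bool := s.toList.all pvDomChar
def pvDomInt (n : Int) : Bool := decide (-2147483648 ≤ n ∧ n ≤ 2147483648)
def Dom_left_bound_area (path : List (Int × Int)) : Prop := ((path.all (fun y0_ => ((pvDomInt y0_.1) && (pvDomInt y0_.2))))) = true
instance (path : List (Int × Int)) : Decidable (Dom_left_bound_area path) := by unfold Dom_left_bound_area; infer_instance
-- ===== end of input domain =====

-- B replaces A's per-vertex full leftward rescan (with list membership) by a single pass
-- keeping a per-row maximum-covered-column dict and a set of path cells (objective: faster).

-- ===== PORT A =====
-- the inner 'while left_col >= 0' loop of A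
def pvWhileA (path : List (Int × Int)) (vrow : Int) (leftCol : Int)
    (area : PySem.Set (Int × Int)) : PySem.Set (Int × Int) :=
  if _h : 0 ≤ leftCol then
    pvWhileA path vrow (leftCol - 1)
      (if path.contains (vrow, leftCol) then area else PySem.Set.add area (vrow, leftCol))
  else area
termination_by (leftCol + 1).toNat
decreasing_by omega

def left_bound_area (path : List (Int × Int)) : List (Int × Int) :=
  path.foldl (fun area v => pvWhileA path v.1 (v.2 - 1) area) PySem.Set.empty

-- ===== PORT B =====
-- body of B's 'for r, c in path' loop; state = (area, cov)
def pvStepB (pathSet : PySem.Set (Int × Int))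
    (st : PySem.Set (Int × Int) × PySem.Dict Int Int) (v : Int × Int) :
    PySem.Set (Int × Int) × PySem.Dict Int Int :=
  let lo := st.2.getD v.1 0
  let area := (PySem.List.pyRange (v.2 - 1) (lo - 1) (-1)).foldl
      (fun a col => if pathSet.contains (v.1, col) then a else PySem.Set.add a (v.1, col)) st.1
  if lo < v.2 then (area, st.2.insert v.1 v.2) else (area, st.2)

def left_bound_area_alt (path : List (Int × Int)) : List (Int × Int) :=
  let pathSet := PySem.Set.ofList path
  (path.foldl (pvStepB pathSet) (PySem.Set.empty, PySem.Dict.empty)).1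

-- ===== PRECONDITION & SPEC =====
def Spec_left_bound_area (path : List (Int × Int)) (out : List (Int × Int)) : Prop := out = left_bound_area_alt path
instance (path : List (Int × Int)) (out : List (Int × Int)) : Decidable (Spec_left_bound_area path out) := by unfold Spec_left_bound_area; infer_instance

-- ===== CLAIM (what is proved, stated in full; the proofs are below) =====
def Claim_equal_left_bound_area : Prop := ∀ (path : List (Int × Int)), Dom_left_bound_area path → Spec_left_bound_area path (left_bound_area path)

-- ===== LEMMAS AND PROOFS =====

-- the common step on an area for one column of a row
def pvCol (path : List (Int × Int)) (r : Int) (a : PySem.Set (Int × Int)) (col : Int) :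
    PySem.Set (Int × Int) :=
  if path.contains (r, col) then a else PySem.Set.add a (r, col)

theorem pvContains_ofList (path : List (Int × Int)) (y : Int × Int) :
    (PySem.Set.ofList path).contains y = path.contains y := by
  simp [PySem.Set.contains_eq_listContains]

-- invariant tying A's set to B's (area, cov) state
def pvInv (path : List (Int × Int)) (area : PySem.Set (Int × Int))
    (cov : PySem.Dict Int Int) : Prop :=
  (∀ r x, (r, x) ∈ area ↔ 0 ≤ x ∧ x < cov.getD r 0 ∧ (r, x) ∉ path) ∧
  (∀ r, 0 ≤ cov.getD r 0)

theorem pvMem_col (path : List (Int × Int)) (r : Int) (a : PySem.Set (Int × Int))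
    (col : Int) (y : Int × Int) :
    y ∈ pvCol path r a col ↔ y ∈ a ∨ (y = (r, col) ∧ (r, col) ∉ path) := by
  unfold pvCol
  by_cases h : (r, col) ∈ path
  · simp [h]

  · simp [PySem.Set.mem_add, h]

theorem pvMem_foldCol (path : List (Int × Int)) (r : Int) (l : List Int)
    (a : PySem.Set (Int × Int)) (y : Int × Int) :
    y ∈ l.foldl (pvCol path r) a ↔
      y ∈ a ∨ ∃ col ∈ l, y = (r, col) ∧ (r, col) ∉ path := by
  induction l generalizing a with
  | nil => simp
  | cons c cs ih =>
    simp only [List.foldl_cons, ih, pvMem_col]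
    constructor
    · rintro (((h | h) | h)) <;> try (first | exact Or.inl h)
      · exact Or.inr ⟨c, by simp, h⟩
      · obtain ⟨col, hc, hy⟩ := h; exact Or.inr ⟨col, by simp [hc], hy⟩
    · rintro (h | ⟨col, hc, hy⟩)
      · exact Or.inl (Or.inl h)
      · rcases List.mem_cons.mp hc with rfl | hc
        · exact Or.inl (Or.inr hy)
        · exact Or.inr ⟨col, hc, hy⟩

-- A's while-loop is a no-op when every reachable column is already covered
theorem pvWhileA_noop_aux (path : List (Int × Int)) (r : Int) :
    ∀ (n : Nat) (leftCol : Int) (area : PySem.Set (Int × Int)),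
      (leftCol + 1).toNat ≤ n →
      (∀ x, 0 ≤ x → x ≤ leftCol → (r, x) ∈ path ∨ (r, x) ∈ area) →
      pvWhileA path r leftCol area = area := by
  intro n
  induction n with
  | zero =>
    intro leftCol area hn H
    rw [pvWhileA, dif_neg (by omega)]
  | succ n ih =>
    intro leftCol area hn H
    by_cases h : 0 ≤ leftCol
    · rw [pvWhileA, dif_pos h]
      have harea : (if path.contains (r, leftCol) then area
          else PySem.Set.add area (r, leftCol)) = area := by
        rcases H leftCol h le_rfl with hp | ha
        · rw [if_pos (List.contains_iff_mem.mpr hp)]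
        · split
          · rfl
          · exact PySem.Set.add_of_mem ha
      rw [harea]
      exact ih (leftCol - 1) area (by omega) (fun x hx hx' => H x hx (by omega))
    · rw [pvWhileA, dif_neg h]

theorem pvWhileA_noop (path : List (Int × Int)) (r : Int) (leftCol : Int)
    (area : PySem.Set (Int × Int))
    (H : ∀ x, 0 ≤ x → x ≤ leftCol → (r, x) ∈ path ∨ (r, x) ∈ area) :
    pvWhileA path r leftCol area = area :=
  pvWhileA_noop_aux path r (leftCol + 1).toNat leftCol area le_rfl H

-- A's while-loop equals the fold of B's countdown range, below coverage lo
theorem pvWhileA_eq_fold (path : List (Int × Int)) (r : Int) (lo : Int) (hlo : 0 ≤ lo) :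
    ∀ (n : Nat) (leftCol : Int) (area : PySem.Set (Int × Int)),
      (leftCol + 1 - lo).toNat ≤ n →
      (∀ x, 0 ≤ x → x < lo → (r, x) ∉ path → (r, x) ∈ area) →
      pvWhileA path r leftCol area =
        (PySem.List.pyRange leftCol (lo - 1) (-1)).foldl (pvCol path r) area := by
  intro n
  induction n with
  | zero =>
    intro leftCol area hn H
    have hlt : leftCol < lo := by omega
    rw [PySem.List.pyRange_neg_one_eq_nil (by omega), List.foldl_nil]
    apply pvWhileA_noop
    intro x hx hx'
    by_cases hp : (r, x) ∈ path
    · exact Or.inl hp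
    · exact Or.inr (H x hx (by omega) hp)
  | succ n ih =>
    intro leftCol area hn H
    by_cases hge : lo ≤ leftCol
    · rw [PySem.List.pyRange_neg_one_cons (by omega), List.foldl_cons]
      rw [pvWhileA, dif_pos (by omega)]
      have harea : ∀ x, 0 ≤ x → x < lo → (r, x) ∉ path → (r, x) ∈ pvCol path r area leftCol := by
        intro x hx hx' hp
        rw [pvMem_col]; exact Or.inl (H x hx hx' hp)
      have := ih (leftCol - 1) (pvCol path r area leftCol) (by omega) harea
      rw [← this]; rfl
    · rw [PySem.List.pyRange_neg_one_eq_nil (by omega), List.foldl_nil]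
      apply pvWhileA_noop
      intro x hx hx'
      by_cases hp : (r, x) ∈ path
      · exact Or.inl hp
      · exact Or.inr (H x hx (by omega) hp)

-- the invariant is preserved by one vertex step
theorem pvInv_step (path : List (Int × Int)) (area : PySem.Set (Int × Int))
    (cov : PySem.Dict Int Int) (r c : Int) (hInv : pvInv path area cov) :
    pvInv path
      ((PySem.List.pyRange (c - 1) (cov.getD r 0 - 1) (-1)).foldl (pvCol path r) area)
      (if cov.getD r 0 < c then cov.insert r c else cov) := by
  obtain ⟨hmem, hnn⟩ := hInv
  constructor
  · intro r' x
    rw [pvMem_foldCol]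
    have hrange : ∀ col : Int, col ∈ PySem.List.pyRange (c - 1) (cov.getD r 0 - 1) (-1) ↔
        cov.getD r 0 - 1 < col ∧ col ≤ c - 1 := fun col => PySem.List.mem_pyRange_neg_one
    constructor
    · rintro (h | ⟨col, hc, heq, hp⟩)
      · rw [hmem r' x] at h
        obtain ⟨h0, h1, h2⟩ := h
        refine ⟨h0, ?_, h2⟩
        split
        next he =>
          rw [PySem.Dict.getD_insert]
          split
          next hrr => subst hrr; omega
          next => exact h1
        next => exact h1
      · injection heq with h1 h2
        subst h2
        rw [hrange] at hc
        rw [h1]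
        refine ⟨by have := hnn r; omega, ?_, hp⟩
        have hlt : cov.getD r 0 < c := by omega
        rw [if_pos hlt, PySem.Dict.getD_insert, if_pos rfl]
        omega
    · rintro ⟨h0, h1, h2⟩
      by_cases hr : r' = r
      · subst hr
        by_cases hlt : cov.getD r' 0 < c
        · rw [if_pos hlt, PySem.Dict.getD_insert, if_pos rfl] at h1
          by_cases hx : x < cov.getD r' 0
          · exact Or.inl ((hmem r' x).mpr ⟨h0, hx, h2⟩)
          · exact Or.inr ⟨x, (hrange x).mpr (by omega), rfl, h2⟩
        · rw [if_neg hlt] at h1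
          exact Or.inl ((hmem r' x).mpr ⟨h0, h1, h2⟩)
      · refine Or.inl ((hmem r' x).mpr ⟨h0, ?_, h2⟩)
        split at h1
        · rwa [PySem.Dict.getD_insert, if_neg hr] at h1
        · exact h1
  · intro r'
    split
    · rw [PySem.Dict.getD_insert]
      split
      · have := hnn r; omega
      · exact hnn r'
    · exact hnn r'

-- B's inner fold equals the pvCol fold (set membership = list membership)
theorem pvFoldB_eq (path : List (Int × Int)) (r : Int) (l : List Int)
    (a : PySem.Set (Int × Int)) :
    l.foldl (fun a col => if (PySem.Set.ofList path).contains (r, col) then a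
      else PySem.Set.add a (r, col)) a = l.foldl (pvCol path r) a := by
  induction l generalizing a with
  | nil => rfl
  | cons c cs ih =>
    simp only [List.foldl_cons]
    rw [show (if (PySem.Set.ofList path).contains (r, c) = true then a
        else PySem.Set.add a (r, c)) = pvCol path r a c by
      rw [pvCol, pvContains_ofList]]
    exact ih _

-- main induction over the path
theorem pvMain (path : List (Int × Int)) :
    ∀ (l : List (Int × Int)) (area : PySem.Set (Int × Int)) (cov : PySem.Dict Int Int),
      pvInv path area cov →
      l.foldl (fun area v => pvWhileA path v.1 (v.2 - 1) area) area =
        (l.foldl (pvStepB (PySem.Set.ofList path)) (area, cov)).1 := by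
  intro l
  induction l with
  | nil => intro area cov _; rfl
  | cons v vs ih =>
    intro area cov hInv
    obtain ⟨r, c⟩ := v
    simp only [List.foldl_cons]
    have hA : pvWhileA path r (c - 1) area =
        (PySem.List.pyRange (c - 1) (cov.getD r 0 - 1) (-1)).foldl (pvCol path r) area := by
      apply pvWhileA_eq_fold path r (cov.getD r 0) (hInv.2 r) (c - 1 + 1 - cov.getD r 0).toNat
        (c - 1) area le_rfl
      intro x hx hx' hp
      exact (hInv.1 r x).mpr ⟨hx, hx', hp⟩
    have hB : pvStepB (PySem.Set.ofList path) (area, cov) (r, c) =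
        ((PySem.List.pyRange (c - 1) (cov.getD r 0 - 1) (-1)).foldl (pvCol path r) area,
          if cov.getD r 0 < c then cov.insert r c else cov) := by
      unfold pvStepB
      simp only [pvFoldB_eq]
      split <;> rfl
    rw [hA, hB]
    exact ih _ _ (pvInv_step path area cov r c hInv)

-- ===== VERDICT (by name: the statement is the Claim_ definition above) =====
theorem left_bound_area_spec : Claim_equal_left_bound_area := by
  intro path _
  unfold Spec_left_bound_area left_bound_area left_bound_area_alt
  apply pvMain
  constructor
  · intro r x
    simp [PySem.Set.empty, PySem.Dict.getD_empty]
    omega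
  · intro r; simp [PySem.Dict.getD_empty]
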